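-- pv_equiv track=rewrite | github.com/RobynsS/advent_of_code_2021 | day_10/main.py | count_score_incomplete
-- ===== SOURCE A (Python) =====
-- def count_score_incomplete(lines):
--     def score_char(charac):
--         if charac == ")":
--             return 1
--         if charac == "]":
--             return 2
--         if charac == "}":
--             return 3
--         if charac == ">":
--             return 4
--
--     counts = []
--
--     for line in lines:
--         count = 0
--         for char in line:
--             count *= 5
--             count += score_char(char)
--         counts.append(count)
--
--     return counts
-- ===== SOURCE B (Python) =====
-- def count_score_incomplete(lines):
--     def score_char(charac):
--         if charac == ")":
--             return 1
--         if charac == "]":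
--             return 2
--         if charac == "}":
--             return 3
--         if charac == ">":
--             return 4
--
--     return [sum(score_char(c) * 5 ** (len(line) - 1 - i) for i, c in enumerate(line))
--             for line in lines]
-- ===== Notes on version B (the rewrite author's own statement) =====
-- stated objective: alternative
-- what changed: Replaces the explicit accumulator loops (Horner multiply-accumulate per line, list built by append) with a list comprehension whose per-line value is an explicit positional-weight sum score_char(c)*5**(len(line)-1-i).
import Mathlib
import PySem

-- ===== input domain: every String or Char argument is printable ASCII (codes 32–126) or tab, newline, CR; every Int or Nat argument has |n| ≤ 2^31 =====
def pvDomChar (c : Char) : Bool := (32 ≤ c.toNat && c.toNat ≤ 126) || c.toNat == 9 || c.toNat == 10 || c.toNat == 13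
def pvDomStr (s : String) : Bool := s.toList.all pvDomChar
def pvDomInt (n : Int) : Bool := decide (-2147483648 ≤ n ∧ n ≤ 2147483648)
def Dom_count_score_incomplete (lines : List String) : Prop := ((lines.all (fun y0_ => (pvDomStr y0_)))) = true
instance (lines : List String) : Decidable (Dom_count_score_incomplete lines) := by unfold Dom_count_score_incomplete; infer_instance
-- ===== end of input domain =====

-- B replaces A's per-line Horner accumulator loop by an explicit positional-weight sum (alternative decomposition, same cost).

-- ===== PORT A =====
-- score_char: returns none for any char other than )]}> (Python returns None, so the
-- subsequent '+=' raises TypeError; those inputs are excluded by Pre_).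
def scoreChar (c : Char) : Option Int :=
  if c = ')' then some 1
  else if c = ']' then some 2
  else if c = '}' then some 3
  else if c = '>' then some 4
  else none

-- inner loop of A: count *= 5; count += score_char(char)  (none = TypeError)
def lineScoreA (l : List Char) : Option Int :=
  l.foldl (fun acc c => acc.bind fun k => (scoreChar c).map fun v => k * 5 + v) (some 0)

def count_score_incomplete (lines : List String) : List Int :=
  lines.map fun s => (lineScoreA s.toList).getD 0  -- getD 0 marks the TypeError case, unreachable under Pre_

-- ===== PORT B =====
-- sum(score_char(c) * 5 ** (n - 1 - i) for i, c in enumerate(line)), n = len(line);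
-- explicit index-carrying recursion over the chars (none = TypeError, excluded by Pre_).
def lineScoreB (n : Nat) : List Char → Nat → Option Int
  | [], _ => some 0
  | c :: t, i => (scoreChar c).bind fun v => (lineScoreB n t (i + 1)).map fun r => v * 5 ^ (n - 1 - i) + r

def count_score_incomplete_alt (lines : List String) : List Int :=
  lines.map fun s => (lineScoreB s.toList.length s.toList 0).getD 0  -- getD 0 marks the TypeError case, unreachable under Pre_

-- ===== PRECONDITION & SPEC =====
-- Pre_ excludes exactly the inputs where score_char returns None and Python A raises TypeError.
def Pre_count_score_incomplete (lines : List String) : Prop :=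
  (lines.all fun s => s.toList.all fun c => c == ')' || c == ']' || c == '}' || c == '>') = true
instance (lines : List String) : Decidable (Pre_count_score_incomplete lines) := by unfold Pre_count_score_incomplete; infer_instance
def pvWitness_count_score_incomplete : List String := [")]}>", "", "))"]
def Spec_count_score_incomplete (lines : List String) (out : List Int) : Prop := out = count_score_incomplete_alt lines
instance (lines : List String) (out : List Int) : Decidable (Spec_count_score_incomplete lines out) := by unfold Spec_count_score_incomplete; infer_instance

-- ===== CLAIM (what is proved, stated in full; the proofs are below) =====
def Claim_equal_count_score_incomplete : Prop := ∀ (lines : List String), Dom_count_score_incomplete lines → Pre_count_score_incomplete lines → Spec_count_score_incomplete lines (count_score_incomplete lines)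

-- ===== LEMMAS AND PROOFS =====

-- value of a valid char (proof-only helper)
def valOf (c : Char) : Int := (scoreChar c).getD 0

theorem scoreChar_valid {c : Char} (h : c = ')' ∨ c = ']' ∨ c = '}' ∨ c = '>') :
    scoreChar c = some (valOf c) := by
  rcases h with h | h | h | h <;> subst h <;> rfl

-- A's fold on a valid line computes the plain Horner fold over the char values
theorem lineA_eq (l : List Char) (h : ∀ c ∈ l, c = ')' ∨ c = ']' ∨ c = '}' ∨ c = '>') :
    ∀ acc : Int,
      l.foldl (fun acc c => acc.bind fun k => (scoreChar c).map fun v => k * 5 + v) (some acc)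
        = some ((l.map valOf).foldl (fun a v => a * 5 + v) acc) := by
  induction l with
  | nil => intro acc; rfl
  | cons c t ih =>
      intro acc
      have hc := scoreChar_valid (h c (List.mem_cons_self ..))
      simp only [List.foldl_cons, List.map_cons, Option.bind_some, hc, Option.map_some]
      exact ih (fun x hx => h x (List.mem_cons_of_mem _ hx)) _

-- B's recursion on a valid line computes the positional sum over the char values
def posSum (n : Nat) : List Int → Nat → Int
  | [], _ => 0
  | v :: t, i => v * 5 ^ (n - 1 - i) + posSum n t (i + 1)

theorem lineB_eq (n : Nat) (l : List Char) (h : ∀ c ∈ l, c = ')' ∨ c = ']' ∨ c = '}' ∨ c = '>') :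
    ∀ i : Nat, lineScoreB n l i = some (posSum n (l.map valOf) i) := by
  induction l with
  | nil => intro i; rfl
  | cons c t ih =>
      intro i
      have hc := scoreChar_valid (h c (List.mem_cons_self ..))
      simp only [lineScoreB, posSum, List.map_cons, hc, Option.bind_some,
        ih (fun x hx => h x (List.mem_cons_of_mem _ hx)) (i + 1), Option.map_some]

-- Horner fold = positional sum (the arithmetic heart)
theorem horner_eq_posSum (vs : List Int) :
    ∀ (acc : Int) (i n : Nat), n = i + vs.length →
      vs.foldl (fun a v => a * 5 + v) acc = acc * 5 ^ vs.length + posSum n vs i := by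
  induction vs with
  | nil => intro acc i n _; simp [posSum]
  | cons v t ih =>
      intro acc i n hn
      have hn' : n = (i + 1) + t.length := by simp [hn, List.length_cons]; omega
      have h1 : n - 1 - i = t.length := by omega
      simp only [List.foldl_cons, posSum, List.length_cons, h1]
      rw [ih (acc * 5 + v) (i + 1) n hn']
      ring

theorem count_score_incomplete_spec : Claim_equal_count_score_incomplete := by
  intro lines _ hpre
  unfold Pre_count_score_incomplete at hpre
  simp only [List.all_eq_true, Bool.or_eq_true, beq_iff_eq] at hpre
  unfold Spec_count_score_incomplete count_score_incomplete count_score_incomplete_alt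
  apply List.map_congr_left
  intro s hs
  have hv : ∀ c ∈ s.toList, c = ')' ∨ c = ']' ∨ c = '}' ∨ c = '>' := by
    intro c hc
    have := hpre s hs c hc
    tauto
  unfold lineScoreA
  rw [lineA_eq s.toList hv 0, lineB_eq s.toList.length s.toList hv 0]
  simp only [Option.getD_some]
  rw [horner_eq_posSum (s.toList.map valOf) 0 0 s.toList.length (by simp)]
  simp [List.length_map]
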